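-- pv_equiv track=rewrite | github.com/lecoqif/Leetcode | 1578-minimum-time-to-make-rope-colorful/1578-minimum-time-to-make-rope-colorful.py | minCost
-- ===== SOURCE A (Python) =====
-- from typing import List
--
-- def minCost(colors: str, neededTime: List[int]) -> int:
--     ret = 0
--
--     prev = 0
--
--     for i in range(1, len(colors)):
--         if colors[i] == colors[prev]:
--             ret += min(neededTime[i], neededTime[prev])
--             if neededTime[i] >= neededTime[prev]:
--                 prev = i
--
--         else:
--             prev = i
--
--     return ret
-- ===== SOURCE B (Python) =====
-- from typing import List
--
-- def minCost(colors: str, neededTime: List[int]) -> int: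
--     # Run-boundary scan: slice out each maximal run of equal colors,
--     # sort it and pay for every balloon except the single most expensive one.
--     res = 0
--     i = 0
--     n = len(colors)
--     while i < n:
--         j = i + 1
--         while j < n and colors[j] == colors[i]:
--             j += 1
--         run = sorted(neededTime[i:j])
--         res += sum(run[:-1])
--         i = j
--     return res
-- ===== Notes on version B (the rewrite author's own statement) =====
-- stated objective: alternative
-- what changed: A is a single greedy pass adding min(neededTime[i], neededTime[prev]) per adjacent equal pair while moving a 'prev' index; B scans for run boundaries with an index while-loop, slices each maximal run out of neededTime, sorts it and sums all but its last (most expensive) element.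
-- outside the precondition, e.g. on minCost('ab', [1]): A returns 0, B returns 0; on minCost('aa', [5]): A raises IndexError, B returns 0
import Mathlib
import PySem

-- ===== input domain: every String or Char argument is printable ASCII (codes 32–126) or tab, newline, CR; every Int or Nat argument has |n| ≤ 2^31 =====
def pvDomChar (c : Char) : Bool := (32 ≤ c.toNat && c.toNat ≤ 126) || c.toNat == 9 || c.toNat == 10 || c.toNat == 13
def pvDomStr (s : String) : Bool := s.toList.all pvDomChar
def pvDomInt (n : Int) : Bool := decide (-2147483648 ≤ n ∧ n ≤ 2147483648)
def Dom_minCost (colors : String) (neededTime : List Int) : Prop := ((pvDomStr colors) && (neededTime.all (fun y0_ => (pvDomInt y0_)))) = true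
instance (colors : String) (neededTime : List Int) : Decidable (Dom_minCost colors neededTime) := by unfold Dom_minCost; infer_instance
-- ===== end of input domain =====

-- B replaces A's pairwise-min greedy with a run-boundary scan that sorts each maximal
-- run and pays for all but its most expensive balloon (objective: alternative).
-- Neither version mutates its arguments.

-- ===== PORT A =====
-- A's loop body: for i in range(1, len(colors)), state (ret, prev); indices are in
-- range on every input admitted by Pre_, so getD defaults are never consulted.
def minCostStepA (cs : List Char) (ts : List Int) (st : Int × Nat) (i : Nat) : Int × Nat :=
  let ret := st.1
  let prev := st.2
  if cs.getD i ' ' = cs.getD prev ' ' then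
    let ret := ret + min (ts.getD i 0) (ts.getD prev 0)
    if ts.getD prev 0 ≤ ts.getD i 0 then (ret, i) else (ret, prev)
  else (ret, i)

def minCost (colors : String) (neededTime : List Int) : Int :=
  ((List.range' 1 (colors.toList.length - 1)).foldl
    (minCostStepA colors.toList neededTime) (0, 0)).1

-- ===== PORT B =====
-- B's inner while: advance j while j < n and colors[j] == colors[i].
def runEndB (cs : List Char) (n i j : Nat) : Nat :=
  if _h : j < n ∧ cs.getD j ' ' = cs.getD i ' ' then runEndB cs n i (j + 1) else j
termination_by n - j
decreasing_by omega

-- termination fact for goB's outer while (i strictly advances to j = runEndB … (i+1) ≥ i+1)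
theorem runEndB_ge (cs : List Char) (n i : Nat) : ∀ k j, n - j ≤ k → j ≤ runEndB cs n i j := by
  intro k
  induction k with
  | zero => intro j hk; rw [runEndB]; split
            · omega
            · exact le_refl j
  | succ k ih =>
    intro j hk
    rw [runEndB]
    split
    · have := ih (j + 1) (by omega); omega
    · exact le_refl j

-- B's outer while: state (res, i); res += sum(sorted(neededTime[i:j])[:-1]); i = j.
def goB (cs : List Char) (ts : List Int) (n i : Nat) : Int :=
  if _h : i < n then
    (PySem.List.slice
      (PySem.List.sorted
        (PySem.List.slice ts (some (i : Int)) (some ((runEndB cs n i (i + 1)) : Int)))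
        (fun x => x) false)
      none (some (-1))).sum + goB cs ts n (runEndB cs n i (i + 1))
  else 0
termination_by n - i
decreasing_by
  have := runEndB_ge cs n i (n - (i + 1)) (i + 1) (le_refl _)
  omega

def minCost_alt (colors : String) (neededTime : List Int) : Int :=
  goB colors.toList neededTime colors.toList.length 0

-- ===== PRECONDITION & SPEC =====
-- Pre_ excludes inputs where neededTime is shorter than colors: on such inputs A raises
-- IndexError whenever an adjacent equal-color pair lies at or past neededTime's end (which
-- inputs raise depends on the color pattern, so the whole shorter-list class is excluded).
def Pre_minCost (colors : String) (neededTime : List Int) : Prop :=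
  colors.toList.length ≤ neededTime.length
instance (colors : String) (neededTime : List Int) : Decidable (Pre_minCost colors neededTime) := by unfold Pre_minCost; infer_instance

def pvWitness_minCost : String × List Int := ("abbca", [1, 2, 3, 4, 5])

def Spec_minCost (colors : String) (neededTime : List Int) (out : Int) : Prop := out = minCost_alt colors neededTime
instance (colors : String) (neededTime : List Int) (out : Int) : Decidable (Spec_minCost colors neededTime out) := by unfold Spec_minCost; infer_instance

-- ===== CLAIM (what is proved, stated in full; the proofs are below) =====
def Claim_equal_minCost : Prop := ∀ (colors : String) (neededTime : List Int), Dom_minCost colors neededTime → Pre_minCost colors neededTime → Spec_minCost colors neededTime (minCost colors neededTime)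

-- ===== LEMMAS AND PROOFS =====

-- Common reference recursion over the zipped (color, time) pairs: m is the maximum time
-- seen in the current run, c its color; each pair of equal color contributes min t m.
def aRec (m : Int) (c : Char) : List (Char × Int) → Int
  | [] => 0
  | (c', t) :: rest => if c' = c then min t m + aRec (max m t) c rest else aRec t c' rest

def aRecStart : List (Char × Int) → Int
  | [] => 0
  | (c, t) :: rest => aRec t c rest

theorem aRec_nil (m : Int) (c : Char) : aRec m c [] = 0 := rfl
theorem aRec_cons (m : Int) (c c' : Char) (t : Int) (rest : List (Char × Int)) :
    aRec m c ((c', t) :: rest)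
      = if c' = c then min t m + aRec (max m t) c rest else aRec t c' rest := rfl
theorem aRecStart_nil : aRecStart ([] : List (Char × Int)) = 0 := rfl
theorem aRecStart_cons (c : Char) (t : Int) (rest : List (Char × Int)) :
    aRecStart ((c, t) :: rest) = aRec t c rest := rfl

-- characterisation of B's inner while loop
theorem runEndB_le (cs : List Char) (n i : Nat) : ∀ k j, n - j ≤ k → j ≤ n → runEndB cs n i j ≤ n := by
  intro k
  induction k with
  | zero => intro j hk hj; rw [runEndB]; split
            · omega
            · exact hj
  | succ k ih =>
    intro j hk hj
    rw [runEndB]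
    split
    · exact ih (j + 1) (by omega) (by omega)
    · exact hj

theorem runEndB_mid (cs : List Char) (n i : Nat) : ∀ k j, n - j ≤ k →
    ∀ l, j ≤ l → l < runEndB cs n i j → cs.getD l ' ' = cs.getD i ' ' := by
  intro k
  induction k with
  | zero => intro j hk l hjl hl; rw [runEndB] at hl; split at hl
            · omega
            · omega
  | succ k ih =>
    intro j hk l hjl hl
    rw [runEndB] at hl
    split at hl
    · rename_i h
      by_cases hlj : l = j
      · rw [hlj]; exact h.2
      · exact ih (j + 1) (by omega) l (by omega) hl
    · omega

theorem runEndB_stop (cs : List Char) (n i : Nat) : ∀ k j, n - j ≤ k →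
    runEndB cs n i j < n → cs.getD (runEndB cs n i j) ' ' ≠ cs.getD i ' ' := by
  intro k
  induction k with
  | zero => intro j hk; rw [runEndB]; split
            · omega
            · rename_i h; intro hn hc; exact h ⟨hn, hc⟩
  | succ k ih =>
    intro j hk
    rw [runEndB]
    split
    · exact ih (j + 1) (by omega)
    · rename_i h; intro hn hc; exact h ⟨hn, hc⟩

theorem zip_drop_nil (cs : List Char) (ts : List Int) (i : Nat) (h : cs.length ≤ i) :
    (cs.zip ts).drop i = [] := by
  apply List.drop_eq_nil_of_le
  rw [List.length_zip]
  exact le_trans (min_le_left _ _) h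

-- cons decomposition of the dropped zip
theorem zip_drop_cons (cs : List Char) (ts : List Int) (i : Nat)
    (hi : i < cs.length) (hit : i < ts.length) :
    (cs.zip ts).drop i = (cs.getD i ' ', ts.getD i 0) :: (cs.zip ts).drop (i + 1) := by
  rw [List.drop_eq_getElem_cons (by simp [List.length_zip]; omega)]
  simp [List.getElem_zip, List.getD_eq_getElem?_getD, hi, hit]

-- A's index loop computes aRec from the state (ret, prev)
theorem A_inv (cs : List Char) (ts : List Int) (hlen : cs.length ≤ ts.length) :
    ∀ (k i : Nat) (ret : Int) (prev : Nat), i + k = cs.length → prev < i →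
    ((List.range' i k).foldl (minCostStepA cs ts) (ret, prev)).1
      = ret + aRec (ts.getD prev 0) (cs.getD prev ' ') ((cs.zip ts).drop i) := by
  intro k
  induction k with
  | zero =>
    intro i ret prev hik hpi
    have hzip : (cs.zip ts).drop i = [] := zip_drop_nil cs ts i (by omega)
    simp [hzip, aRec_nil]
  | succ k ih =>
    intro i ret prev hik hpi
    have hi : i < cs.length := by omega
    have hit : i < ts.length := by omega
    rw [List.range'_succ, List.foldl_cons,
        zip_drop_cons cs ts i hi hit]
    rw [aRec_cons]
    by_cases hc : cs.getD i ' ' = cs.getD prev ' '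
    · simp only [minCostStepA, hc, if_true]
      by_cases hle : ts.getD prev 0 ≤ ts.getD i 0
      · simp only [if_pos hle]
        rw [ih (i + 1) _ i (by omega) (by omega)]
        have h1 : max (ts.getD prev 0) (ts.getD i 0) = ts.getD i 0 := max_eq_right hle
        rw [h1, hc]
        ring
      · simp only [if_neg hle]
        rw [ih (i + 1) _ prev (by omega) (by omega)]
        have h1 : max (ts.getD prev 0) (ts.getD i 0) = ts.getD prev 0 :=
          max_eq_left (by omega)
        rw [h1]
        ring
    · simp only [minCostStepA, hc, if_false]
      rw [ih (i + 1) _ i (by omega) (by omega)]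

-- a maximal same-color run contributes (m + sum) - max to aRec
theorem aRec_run (cs : List Char) (ts : List Int) (hlen : cs.length ≤ ts.length)
    (c : Char) (j : Nat) (hj : j ≤ cs.length)
    (hstop : j = cs.length ∨ cs.getD j ' ' ≠ c) :
    ∀ (k i : Nat) (m : Int), i + k = j → (∀ l, i ≤ l → l < j → cs.getD l ' ' = c) →
    aRec m c ((cs.zip ts).drop i)
      = m + ((ts.drop i).take (j - i)).sum - ((ts.drop i).take (j - i)).foldl max m
        + aRecStart ((cs.zip ts).drop j) := by
  intro k
  induction k with
  | zero =>
    intro i m hik _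
    have hij : i = j := by omega
    subst hij
    simp only [Nat.sub_self, List.take_zero, List.sum_nil, List.foldl_nil]
    by_cases hi2 : i < cs.length
    · have hne : cs.getD i ' ' ≠ c := by
        rcases hstop with h | h
        · exact absurd h (by omega)
        · exact h
      rw [zip_drop_cons cs ts i hi2 (by omega), aRec_cons, if_neg hne, aRecStart_cons]
      omega
    · have hzip : (cs.zip ts).drop i = [] := zip_drop_nil cs ts i (by omega)
      rw [hzip, aRec_nil, aRecStart_nil]
      omega
  | succ k ih =>
    intro i m hik hall
    have hi : i < cs.length := by omega
    have hit : i < ts.length := by omega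
    have hci : cs.getD i ' ' = c := hall i (le_refl i) (by omega)
    rw [zip_drop_cons cs ts i hi hit, aRec_cons, if_pos hci]
    rw [ih (i + 1) (max m (ts.getD i 0)) (by omega)
        (fun l hl1 hl2 => hall l (by omega) hl2)]
    have hdrop : ts.drop i = ts.getD i 0 :: ts.drop (i + 1) := by
      rw [List.drop_eq_getElem_cons hit]
      simp [List.getD_eq_getElem?_getD, hit]
    have htake : (ts.drop i).take (j - i)
        = ts.getD i 0 :: (ts.drop (i + 1)).take (j - (i + 1)) := by
      rw [hdrop]
      have : j - i = (j - (i + 1)) + 1 := by omega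
      rw [this, List.take_succ_cons]
    rw [htake]
    simp only [List.sum_cons, List.foldl_cons]
    have : min (ts.getD i 0) m + max m (ts.getD i 0) = m + ts.getD i 0 := by omega
    omega

-- the foldl-max of a run is its maximum
theorem foldl_max_mem : ∀ (l : List Int) (a : Int), List.foldl max a l = a ∨ List.foldl max a l ∈ l := by
  intro l
  induction l with
  | nil => intro a; left; rfl
  | cons x t ih =>
    intro a
    simp only [List.foldl_cons]
    rcases ih (max a x) with h | h
    · rcases le_total a x with hab | hab
      · right; rw [h, max_eq_right hab]; exact List.mem_cons_self
      · left; rw [h, max_eq_left hab]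
    · right; exact List.mem_cons_of_mem x h
theorem le_foldl_max : ∀ (l : List Int) (a : Int), a ≤ List.foldl max a l ∧ ∀ x ∈ l, x ≤ List.foldl max a l := by
  intro l
  induction l with
  | nil => intro a; exact ⟨le_refl a, by simp⟩
  | cons y t ih =>
    intro a
    simp only [List.foldl_cons]
    obtain ⟨h1, h2⟩ := ih (max a y)
    refine ⟨le_trans (le_max_left a y) h1, ?_⟩
    intro x hx
    rcases List.mem_cons.mp hx with h | h
    · rw [h]; exact le_trans (le_max_right a y) h1
    · exact h2 x h

-- in a ≤-sorted list every element is at most the last one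
theorem le_getLast_of_pairwise : ∀ (s : List Int) (h : s ≠ []),
    s.Pairwise (· ≤ ·) → ∀ x ∈ s, x ≤ s.getLast h := by
  intro s
  induction s with
  | nil => intro h; exact absurd rfl h
  | cons a t ih =>
    intro _ hp x hx
    cases t with
    | nil => simp at hx; simp [hx, List.getLast]
    | cons b u =>
      rw [List.getLast_cons (by simp)]
      rcases List.mem_cons.mp hx with h | h
      · subst h
        have hx2 := List.getLast_mem (l := b :: u) (by simp)
        exact le_trans ((List.pairwise_cons.mp hp).1 _ hx2) (le_refl _)
      · exact ih (by simp) (List.pairwise_cons.mp hp).2 x h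

-- sum(sorted(l)[:-1]) = sum(l) - max(l)
theorem sum_sorted_dropLast (l : List Int) (mx : Int) (hm : mx ∈ l) (hmax : ∀ x ∈ l, x ≤ mx) :
    ((PySem.List.sorted l (fun x => x) false).dropLast).sum = l.sum - mx := by
  have hperm := PySem.List.sorted_perm l (fun x => x) false
  have hne : PySem.List.sorted l (fun x => x) false ≠ [] := by
    intro h
    rw [h] at hperm
    rw [← hperm.mem_iff] at hm
    exact absurd hm (List.not_mem_nil)
  have hpair : (PySem.List.sorted l (fun x => x) false).Pairwise (· ≤ ·) := by
    have := PySem.List.sorted_pairwise l (fun x => x)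
    simpa using this
  set s := PySem.List.sorted l (fun x => x) false with hs
  have hsplit : s.dropLast ++ [s.getLast hne] = s := List.dropLast_append_getLast hne
  have hsum : s.dropLast.sum + s.getLast hne = s.sum := by
    conv_rhs => rw [← hsplit]
    simp
  have hlast : s.getLast hne = mx := by
    apply le_antisymm
    · exact hmax _ (hperm.mem_iff.mp (List.getLast_mem hne))
    · exact le_getLast_of_pairwise s hne hpair mx (hperm.mem_iff.mpr hm)
  have hsums : s.sum = l.sum := hperm.sum_eq
  omega

-- B's outer loop computes aRecStart on the remaining suffix
theorem goB_eq (cs : List Char) (ts : List Int) (hlen : cs.length ≤ ts.length) :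
    ∀ (k i : Nat), cs.length - i ≤ k →
    goB cs ts cs.length i = aRecStart ((cs.zip ts).drop i) := by
  intro k
  induction k with
  | zero =>
    intro i hk
    rw [goB]
    have hzip : (cs.zip ts).drop i = [] := zip_drop_nil cs ts i (by omega)
    rw [dif_neg (by omega), hzip]
    rfl
  | succ k ih =>
    intro i hk
    rw [goB]
    by_cases hi : i < cs.length
    · rw [dif_pos hi]
      set n := cs.length with hn
      set j := runEndB cs n i (i + 1) with hjdef
      have hij : i + 1 ≤ j := runEndB_ge cs n i (n - (i + 1)) (i + 1) (le_refl _)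
      have hjn : j ≤ n := runEndB_le cs n i (n - (i + 1)) (i + 1) (le_refl _) (by omega)
      have hmid : ∀ l, i + 1 ≤ l → l < j → cs.getD l ' ' = cs.getD i ' ' :=
        runEndB_mid cs n i (n - (i + 1)) (i + 1) (le_refl _)
      have hstop : j = n ∨ cs.getD j ' ' ≠ cs.getD i ' ' := by
        by_cases h : j < n
        · right; exact runEndB_stop cs n i (n - (i + 1)) (i + 1) (le_refl _) h
        · left; omega
      have hit : i < ts.length := by omega
      -- the sliced run is getD i :: T
      have hslice : PySem.List.slice ts (some (i : Int)) (some (j : Int))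
          = ts.getD i 0 :: (ts.drop (i + 1)).take (j - (i + 1)) := by
        rw [PySem.List.slice_natCast]
        rw [List.drop_eq_getElem_cons hit]
        have : j - i = (j - (i + 1)) + 1 := by omega
        rw [this, List.take_succ_cons]
        simp [List.getD_eq_getElem?_getD, hit]
      set T := (ts.drop (i + 1)).take (j - (i + 1)) with hT
      set m := ts.getD i 0 with hm
      -- sorting then dropping the last element pays sum - max
      have hmx := le_foldl_max T m
      have hmem : List.foldl max m T ∈ m :: T := by
        rcases foldl_max_mem T m with h | h
        · rw [h]; exact List.mem_cons_self
        · exact List.mem_cons_of_mem m h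
      have hub : ∀ x ∈ m :: T, x ≤ List.foldl max m T := by
        intro x hx
        rcases List.mem_cons.mp hx with h | h
        · rw [h]; exact hmx.1
        · exact hmx.2 x h
      have hsorted := sum_sorted_dropLast (m :: T) (List.foldl max m T) hmem hub
      rw [hslice, PySem.List.slice_to_neg_one, hsorted]
      -- recurse and rewrite via aRec_run
      rw [ih j (by omega)]
      rw [zip_drop_cons cs ts i hi hit, aRecStart_cons]
      rw [aRec_run cs ts hlen (cs.getD i ' ') j hjn hstop (j - (i + 1)) (i + 1) m
          (by omega) hmid]
      simp only [List.sum_cons, ← hT]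
    · rw [dif_neg hi]
      have hzip : (cs.zip ts).drop i = [] := zip_drop_nil cs ts i (by omega)
      rw [hzip]; rfl

-- ===== VERDICT (by name: the statement is the Claim_ definition above) =====
theorem minCost_spec : Claim_equal_minCost := by
  intro colors neededTime _ hpre
  unfold Pre_minCost at hpre
  unfold Spec_minCost minCost minCost_alt
  rw [goB_eq colors.toList neededTime hpre colors.toList.length 0 (le_refl _), List.drop_zero]
  generalize hcs : colors.toList = cs at *
  cases cs with
  | nil => simp [aRecStart]
  | cons c rest =>
    cases neededTime with
    | nil => simp at hpre
    | cons t tts =>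
      have key := A_inv (c :: rest) (t :: tts) hpre ((c :: rest).length - 1) 1 0 0
        (by simp only [List.length_cons]; omega) (by omega)
      simp only [List.getD_cons_zero] at key
      rw [key]
      have h1 : (c :: rest).zip (t :: tts) = (c, t) :: rest.zip tts := rfl
      have h2 : ((c :: rest).zip (t :: tts)).drop 1 = rest.zip tts := by rw [h1]; rfl
      rw [h2, h1, aRecStart_cons]
      ring
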